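-- pv_equiv track=rewrite | github.com/krylovsergey1999/DeepLearningIntro | 1-semester/python-hw/create_array.py | cumsum_and_erase
-- ===== SOURCE A (Python) =====
-- def cumsum_and_erase(a, erase=1):
--     B = []
--     pred = 0
--     for i in a:
--         pred += i
--         if pred != erase:
--             B.append(pred)
--     return B
-- ===== SOURCE B (Python) =====
-- def cumsum_and_erase(a, erase=1):
--     # divide-and-conquer prefix sums: prefix(xs) = prefix(left) ++ (prefix(right) shifted
--     # by the left half's total); then filter out values equal to erase
--     def prefix(xs):
--         n = len(xs)
--         if n == 0:
--             return []
--         if n == 1: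
--             return [xs[0]]
--         mid = n // 2
--         left = prefix(xs[:mid])
--         right = prefix(xs[mid:])
--         off = left[-1]
--         return left + [off + s for s in right]
--     return [s for s in prefix(a) if s != erase]
-- ===== Notes on version B (the rewrite author's own statement) =====
-- stated objective: alternative
-- what changed: A's single fused running-total loop is replaced by a divide-and-conquer computation of the prefix-sum table (split in half, recurse, shift the right half's sums by the left half's total) followed by a separate filter pass.
import Mathlib
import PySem

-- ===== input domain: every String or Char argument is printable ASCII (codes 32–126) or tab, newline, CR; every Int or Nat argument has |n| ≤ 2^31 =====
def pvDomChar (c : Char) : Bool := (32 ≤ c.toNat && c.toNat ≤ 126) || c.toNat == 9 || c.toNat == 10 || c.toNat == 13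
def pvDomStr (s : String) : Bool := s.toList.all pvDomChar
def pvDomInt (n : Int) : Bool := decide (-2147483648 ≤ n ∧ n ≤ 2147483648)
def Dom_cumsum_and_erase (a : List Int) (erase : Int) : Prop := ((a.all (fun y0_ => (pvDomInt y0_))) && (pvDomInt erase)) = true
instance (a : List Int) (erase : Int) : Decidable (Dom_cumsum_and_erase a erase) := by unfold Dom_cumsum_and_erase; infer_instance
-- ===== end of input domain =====

-- B replaces A's fused running-total loop by a divide-and-conquer prefix-sum table plus a filter pass; alternative decomposition, not faster.

-- ===== PORT A =====
-- fused loop: state is (pred, B), append when pred ≠ erase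
def cumsumLoop (erase : Int) : List Int → Int → List Int → List Int
  | [], _, B => B
  | i :: t, pred, B =>
      let pred' := pred + i
      cumsumLoop erase t pred' (if pred' ≠ erase then B ++ [pred'] else B)

def cumsum_and_erase (a : List Int) (erase : Int) : List Int :=
  cumsumLoop erase a 0 []

-- ===== PORT B =====
-- prefix(xs): split at mid = n // 2, recurse on both halves, shift the right half's
-- sums by left[-1] (the left half's total); left is never empty, so left[-1] is total there
def prefixDC : List Int → List Int
  | [] => []
  | [x] => [x]
  | x :: y :: t =>
      let mid := (x :: y :: t).length / 2
      let l := prefixDC ((x :: y :: t).take mid)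
      let r := prefixDC ((x :: y :: t).drop mid)
      let off := l.getLastD 0
      l ++ r.map (fun s => off + s)
  termination_by xs => xs.length
  decreasing_by all_goals simp [List.length_take, List.length_drop]; omega

def cumsum_and_erase_alt (a : List Int) (erase : Int) : List Int :=
  (prefixDC a).filter (fun s => s ≠ erase)

-- ===== PRECONDITION & SPEC =====
def Spec_cumsum_and_erase (a : List Int) (erase : Int) (out : List Int) : Prop := out = cumsum_and_erase_alt a erase
instance (a : List Int) (erase : Int) (out : List Int) : Decidable (Spec_cumsum_and_erase a erase out) := by unfold Spec_cumsum_and_erase; infer_instance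

-- ===== CLAIM (what is proved, stated in full; the proofs are below) =====
def Claim_equal_cumsum_and_erase : Prop := ∀ (a : List Int) (erase : Int), Dom_cumsum_and_erase a erase → Spec_cumsum_and_erase a erase (cumsum_and_erase a erase)

-- ===== LEMMAS AND PROOFS =====
-- reference prefix-sum table: the running totals starting from acc
def accumFrom (acc : Int) : List Int → List Int
  | [] => []
  | i :: t => (acc + i) :: accumFrom (acc + i) t

theorem cumsumLoop_eq (erase : Int) (a : List Int) :
    ∀ (pred : Int) (B : List Int),
      cumsumLoop erase a pred B = B ++ (accumFrom pred a).filter (fun s => s ≠ erase) := by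
  induction a with
  | nil => intro pred B; simp [cumsumLoop, accumFrom]
  | cons i t ih =>
      intro pred B
      simp only [cumsumLoop, accumFrom, List.filter]
      rw [ih]
      by_cases h : pred + i = erase <;> simp [h]

theorem accumFrom_append (u v : List Int) : ∀ c : Int,
    accumFrom c (u ++ v) = accumFrom c u ++ accumFrom (c + u.sum) v := by
  induction u with
  | nil => intro c; simp [accumFrom]
  | cons i t ih => intro c; simp [accumFrom, ih, add_assoc]

theorem accumFrom_shift (d : Int) (xs : List Int) : ∀ c : Int,
    accumFrom (c + d) xs = (accumFrom d xs).map (fun s => c + s) := by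
  induction xs generalizing d with
  | nil => intro c; simp [accumFrom]
  | cons i t ih =>
      intro c
      simp only [accumFrom, List.map]
      rw [show c + d + i = c + (d + i) by ring, ih (d + i) c]

theorem accumFrom_getLastD (t : List Int) : ∀ (c i : Int),
    (accumFrom c (i :: t)).getLastD 0 = c + (i :: t).sum := by
  induction t with
  | nil => intro c i; simp [accumFrom]
  | cons j t ih =>
      intro c i
      show (accumFrom (c + i) (j :: t)).getLastD 0 = _
      rw [ih]
      simp; ring

theorem prefixDC_eq (xs : List Int) : prefixDC xs = accumFrom 0 xs := by
  induction xs using prefixDC.induct with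
  | case1 => simp [prefixDC, accumFrom]
  | case2 x => simp [prefixDC, accumFrom]
  | case3 x y t mid ih1 ih2 =>
      rw [prefixDC]
      rw [ih1, ih2]
      have hsplit : x :: y :: t = (x :: y :: t).take mid ++ (x :: y :: t).drop mid :=
        (List.take_append_drop _ _).symm
      conv_rhs => rw [hsplit]
      rw [accumFrom_append]
      congr 1
      have hm : 1 ≤ mid := by
        show 1 ≤ (x :: y :: t).length / 2
        simp only [List.length_cons]
        omega
      have hne : (x :: y :: t).take mid ≠ [] := by
        intro h
        rcases List.take_eq_nil_iff.mp h with h1 | h1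
        · omega
        · simp at h1
      obtain ⟨i, u, hu⟩ := List.exists_cons_of_ne_nil hne
      rw [hu, accumFrom_getLastD, ← hu, zero_add, ← accumFrom_shift, add_zero]

-- ===== VERDICT (by name: the statement is the Claim_ definition above) =====
theorem cumsum_and_erase_spec : Claim_equal_cumsum_and_erase := by
  intro a erase _
  unfold Spec_cumsum_and_erase cumsum_and_erase cumsum_and_erase_alt
  rw [prefixDC_eq, cumsumLoop_eq]
  simp
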